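/- GENERATED by c/gen_decode.py: decode facts of the image, one per distinct instruction byte string. -/
import UserX.DecodeImage

#decode_all Vorbis.Dec
  "0f28fd"  -- movaps xmm7,xmm5
  "0f848d020000"  -- je 1112b5
  "0f8539ffffff"  -- jne 113b15
  "0f8cb6000000"  -- jl 115bdc
  "0f95c0"  -- setne al
  "0fb7442430"  -- movzx eax,WORD PTR [rsp+0x30]
  "39f8"  -- cmp eax,edi
  "410fb65e0d"  -- movzx ebx,BYTE PTR [r14+0xd]
  "41807c241b00"  -- cmp BYTE PTR [r12+0x1b],0x0
  "41898424e4060000"  -- mov DWORD PTR [r12+0x6e4],eax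
  "418b9ee0060000"  -- mov ebx,DWORD PTR [r14+0x6e0]
  "41d1fe"  -- sar r14d,1
  "440fb6ac2bd4050000"  -- movzx r13d,BYTE PTR [rbx+rbp*1+0x5d4]
  "443ba5b0000000"  -- cmp r12d,DWORD PTR [rbp+0xb0]
  "44898524ffffff"  -- mov DWORD PTR [rbp-0xdc],r8d
  "448b4c2404"  -- mov r9d,DWORD PTR [rsp+0x4]
  "448bbb98000000"  -- mov r15d,DWORD PTR [rbx+0x98]
  "4585e4"  -- test r12d,r12d
  "458b7424f4"  -- mov r14d,DWORD PTR [r12-0xc]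
  "48039dd8010000"  -- add rbx,QWORD PTR [rbp+0x1d8]
  "4863c9"  -- movsxd rcx,ecx
  "4883c418"  -- add rsp,0x18
  "4889542418"  -- mov QWORD PTR [rsp+0x18],rdx
  "488b08"  -- mov rcx,QWORD PTR [rax]
  "488b7dc8"  -- mov rdi,QWORD PTR [rbp-0x38]
  "488d4501"  -- lea rax,[rbp+0x1]
  "488d7be8"  -- lea rdi,[rbx-0x18]
  "488db880fbffff"  -- lea rdi,[rax-0x480]
  "488dbceb68030000"  -- lea rdi,[rbx+rbp*8+0x368]
  "48c1e834"  -- shr rax,0x34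
  "49035c2410"  -- add rbx,QWORD PTR [r12+0x10]
  "4983c510"  -- add r13,0x10
  "498d2c46"  -- lea rbp,[r14+rax*2]
  "498d7f02"  -- lea rdi,[r15+0x2]
  "49c785c800c00000000000"  -- mov QWORD PTR [r13+0xc000c8],0x0
  "4b8d3c36"  -- lea rdi,[r14+r14*1]
  "4c89442408"  -- mov QWORD PTR [rsp+0x8],r8
  "4c8b6340"  -- mov r12,QWORD PTR [rbx+0x40]
  "4c8d34c1"  -- lea r14,[rcx+rax*8]
  "4d63f4"  -- movsxd r14,r12d
  "4e036cfb08"  -- add r13,QWORD PTR [rbx+r15*8+0x8]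
  "660f6ecd"  -- movd xmm1,ebp
  "6641891e"  -- mov WORD PTR [r14],bx
  "72d5"  -- jb 10145e
  "745e"  -- je 1149a3
  "7566"  -- jne 10d4cc
  "7c4d"  -- jl 10d7aa
  "7e9a"  -- jle 104a15
  "81c7ff030000"  -- add edi,0x3ff
  "83e003"  -- and eax,0x3
  "89442440"  -- mov DWORD PTR [rsp+0x40],eax
  "8993e8060000"  -- mov DWORD PTR [rbx+0x6e8],edx
  "8b442424"  -- mov eax,DWORD PTR [rsp+0x24]
  "8b7c2418"  -- mov edi,DWORD PTR [rsp+0x18]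
  "8d34dd00000000"  -- lea esi,[rbx*8+0x0]
  "be06000000"  -- mov esi,0x6
  "c685d506000001"  -- mov BYTE PTR [rbp+0x6d5],0x1
  "c783d8060000ffffffff"  -- mov DWORD PTR [rbx+0x6d8],0xffffffff
  "e804c0ffff"  -- call 1003c0
  "e80e0effff"  -- call 100640
  "e8187affff"  -- call 100800
  "e821fdffff"  -- call 100059
  "e82ba5feff"  -- call 100300
  "e8344effff"  -- call 108f20
  "e83f98ffff"  -- call 100800
  "e84914ffff"  -- call 100800
  "e8556cffff"  -- call 100720
  "e86253ffff"  -- call 100640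
  "e86db2ffff"  -- call 103d00
  "e878f9ffff"  -- call 101e60
  "e883bcffff"  -- call 100720
  "e88ebbffff"  -- call 100800
  "e897faffff"  -- call 101d00
  "e8a1f8feff"  -- call 100640
  "e8add4ffff"  -- call 100d60
  "e8b686ffff"  -- call 100720
  "e8c16ffeff"  -- call 100720
  "e8ca6affff"  -- call 10b100
  "e8d56fffff"  -- call 10d1c0
  "e8df9dfeff"  -- call 1003c0
  "e8e84fffff"  -- call 103dc0
  "e8f074ffff"  -- call 100640
  "e8fba3feff"  -- call 100800
  "e92ae1ffff"  -- jmp 113b22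
  "e972e0ffff"  -- jmp 113b22
  "e9caedffff"  -- jmp 113b22
  "eb23"  -- jmp 10456c
  "ebb2"  -- jmp 104152
  "f20f101424"  -- movsd xmm2,QWORD PTR [rsp]
  "f20f591dc7d60100"  -- mulsd xmm3,QWORD PTR [rip+0x1d6c7]
  "f30f100b"  -- movss xmm1,DWORD PTR [rbx]
  "f30f106318"  -- movss xmm4,DWORD PTR [rbx+0x18]
  "f30f1143c8"  -- movss DWORD PTR [rbx-0x38],xmm0
  "f30f11642404"  -- movss DWORD PTR [rsp+0x4],xmm4
  "f30f5843fc"  -- addss xmm0,DWORD PTR [rbx-0x4]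
  "f30f594d64"  -- mulss xmm1,DWORD PTR [rbp+0x64]
  "f30f5cd3"  -- subss xmm2,xmm3
  "f3410f1144240c"  -- movss DWORD PTR [r12+0xc],xmm0
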